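-- pv_equiv track=rewrite | github.com/s-herrera/phd-thesis | data/data_preprocessing/general_preprocessing.py | remove_MISC
-- ===== SOURCE A (Python) =====
-- def remove_MISC(conll):
--     res = []
--     lines = conll.split("\n")
--     for line in lines:
--         columns = line.split("\t")
--         if len(columns) > 9:
--             columns[9] = "_"
--         line_str = "\t".join(columns)
--         res.append(line_str)
--     return "\n".join(res)
-- ===== SOURCE B (Python) =====
-- def remove_MISC(conll):
--     out = []
--     tabs = 0
--     skip = False
--     for ch in conll:
--         if ch == "\n":
--             tabs = 0
--             skip = False
--             out.append(ch)
--         elif ch == "\t":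
--             tabs += 1
--             skip = False
--             out.append(ch)
--             if tabs == 9:
--                 out.append("_")
--                 skip = True
--         elif not skip:
--             out.append(ch)
--     return "".join(out)
-- ===== Notes on version B (the rewrite author's own statement) =====
-- stated objective: alternative
-- what changed: Replaces the split-by-newline / split-by-tab / set-column-9 / join pipeline with a single character-level state-machine pass that counts tabs per line and, right after the ninth tab, emits the underscore placeholder and skips the rest of that field.
import Mathlib
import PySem

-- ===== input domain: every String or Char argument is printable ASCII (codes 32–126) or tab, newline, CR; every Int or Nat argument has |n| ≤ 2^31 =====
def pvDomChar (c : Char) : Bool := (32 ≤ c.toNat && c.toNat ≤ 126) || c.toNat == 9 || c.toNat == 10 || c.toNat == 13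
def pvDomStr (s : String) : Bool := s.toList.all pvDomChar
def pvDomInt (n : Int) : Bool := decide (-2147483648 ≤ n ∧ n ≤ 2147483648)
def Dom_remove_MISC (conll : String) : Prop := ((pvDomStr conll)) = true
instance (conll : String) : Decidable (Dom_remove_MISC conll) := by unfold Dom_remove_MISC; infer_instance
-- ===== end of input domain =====

-- B replaces A's split/modify/join pipeline by a one-pass tab-counting state machine over the characters (alternative decomposition, same cost).

-- ===== PORT A =====
def remove_MISC (conll : String) : String :=
  let lines := PySem.Chars.splitOn conll.toList ['\n']
  let res : List (List Char) := lines.foldl (fun res line =>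
    let columns := PySem.Chars.splitOn line ['\t']
    let columns := if 9 < columns.length then PySem.List.pySetD columns (9 : Int) ['_'] else columns
    let line_str := PySem.Chars.join ['\t'] columns
    res ++ [line_str]) []
  String.ofList (PySem.Chars.join ['\n'] res)

-- ===== PORT B =====
-- the character loop of Source B: `tabs` counts tabs on the current line, `skip` is true
-- while inside the 10th field (whose characters are dropped after the '_' was emitted)
def scanB : List Char → Nat → Bool → List Char
  | [], _, _ => []
  | c :: cs, tabs, skip =>
    if c = '\n' then '\n' :: scanB cs 0 false
    else if c = '\t' then
      if tabs + 1 = 9 then '\t' :: '_' :: scanB cs (tabs + 1) true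
      else '\t' :: scanB cs (tabs + 1) false
    else if skip then scanB cs tabs skip
    else c :: scanB cs tabs skip

def remove_MISC_alt (conll : String) : String :=
  String.ofList (scanB conll.toList 0 false)

-- ===== PRECONDITION & SPEC =====
def Spec_remove_MISC (conll : String) (out : String) : Prop := out = remove_MISC_alt conll
instance (conll : String) (out : String) : Decidable (Spec_remove_MISC conll out) := by unfold Spec_remove_MISC; infer_instance

-- ===== CLAIM (what is proved, stated in full; the proofs are below) =====
def Claim_equal_remove_MISC : Prop := ∀ (conll : String), Dom_remove_MISC conll → Spec_remove_MISC conll (remove_MISC conll)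

-- ===== LEMMAS AND PROOFS =====

-- structural single-character split (the shape both ports are reduced to)
def sp (d : Char) : List Char → List (List Char)
  | [] => [[]]
  | c :: cs =>
    if c = d then [] :: sp d cs
    else (c :: (sp d cs).headI) :: (sp d cs).tail

lemma sp_ne_nil (d : Char) (cs : List Char) : sp d cs ≠ [] := by
  cases cs with
  | nil => simp [sp]
  | cons c cs => unfold sp; split <;> simp

lemma sp_headI_tail (d : Char) (cs : List Char) :
    (sp d cs).headI :: (sp d cs).tail = sp d cs := by
  cases h : sp d cs with
  | nil => exact absurd h (sp_ne_nil d cs)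
  | cons x xs => simp

lemma sp_no_sep (d : Char) (cs : List Char) : ∀ l ∈ sp d cs, d ∉ l := by
  induction cs with
  | nil => simp [sp]
  | cons c cs ih =>
    intro l hl
    unfold sp at hl
    by_cases hcd : c = d
    · rw [if_pos hcd] at hl
      rcases List.mem_cons.mp hl with rfl | h
      · simp
      · exact ih l h
    · rw [if_neg hcd] at hl
      rcases List.mem_cons.mp hl with rfl | h
      · intro hmem
        rcases List.mem_cons.mp hmem with h' | h'
        · exact hcd h'.symm
        · exact ih (sp d cs).headI (by rw [← sp_headI_tail d cs]; simp) h'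
      · exact ih l (by rw [← sp_headI_tail d cs]; exact List.mem_cons_of_mem _ h)

-- reduction equations of PySem.Chars.splitOn.go (proved by rfl; cited below)
lemma go_nil (d : Char) (cur : List Char) (acc : List (List Char)) (f : Nat) :
    PySem.Chars.splitOn.go [d] (f + 1) [] cur acc = (cur.reverse :: acc).reverse := rfl

lemma go_cons (d c : Char) (rest cur : List Char) (acc : List (List Char)) (f : Nat) :
    PySem.Chars.splitOn.go [d] (f + 1) (c :: rest) cur acc =
      (if [d].isPrefixOf (c :: rest) then
        PySem.Chars.splitOn.go [d] f (List.drop 1 (c :: rest)) [] (cur.reverse :: acc)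
       else PySem.Chars.splitOn.go [d] f rest (c :: cur) acc) := rfl

lemma go_single (d : Char) (l cur : List Char) (acc : List (List Char)) (fuel : Nat)
    (hf : l.length < fuel) :
    PySem.Chars.splitOn.go [d] fuel l cur acc =
      acc.reverse ++ (cur.reverse ++ (sp d l).headI) :: (sp d l).tail := by
  induction l generalizing fuel cur acc with
  | nil =>
    cases fuel with
    | zero => omega
    | succ f => simp [go_nil, sp]
  | cons c rest ih =>
    cases fuel with
    | zero => omega
    | succ f =>
      rw [go_cons]
      by_cases hcd : c = d
      · subst hcd
        rw [if_pos (by simp [List.isPrefixOf])]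
        rw [show List.drop 1 (c :: rest) = rest from rfl]
        rw [ih [] (cur.reverse :: acc) f (Nat.lt_of_succ_lt_succ hf)]
        simp [sp, sp_headI_tail]
      · rw [if_neg (by simp [List.isPrefixOf]; exact fun h => hcd h.symm)]
        rw [ih (c :: cur) acc f (Nat.lt_of_succ_lt_succ hf)]
        simp [sp, hcd]

lemma splitOn_eq_sp (d : Char) (cs : List Char) :
    PySem.Chars.splitOn cs [d] = sp d cs := by
  unfold PySem.Chars.splitOn
  rw [go_single d cs [] [] (cs.length + 1) (by omega)]
  simpa using sp_headI_tail d cs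

-- intercalating a single-char separator, flatMap form
lemma intercalate_single (c : Char) (y : List Char) (ys : List (List Char)) :
    List.intercalate [c] (y :: ys) = y ++ ys.flatMap (fun z => c :: z) := by
  induction ys generalizing y with
  | nil => simp [List.intercalate]
  | cons z zs ih =>
    have : List.intercalate [c] (y :: z :: zs) = y ++ [c] ++ List.intercalate [c] (z :: zs) := by
      simp [List.intercalate, List.intersperse]
    rw [this, ih z]
    simp

-- what A computes for one line (after splitOn → sp), generalised over the scanner state:
-- `skip` (= inside field 9) drops the rest of the current field; otherwise field 9-tabs
-- (global field 9) is replaced by "_" when it exists.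
def G (l : List Char) (tabs : Nat) (skip : Bool) : List Char :=
  let cols := sp '\t' l
  if skip then List.intercalate ['\t'] ([] :: cols.tail)
  else if tabs < 9 then
    (if 9 - tabs < cols.length then List.intercalate ['\t'] (cols.set (9 - tabs) ['_'])
     else List.intercalate ['\t'] cols)
  else List.intercalate ['\t'] cols

lemma inter_cons_head (s x : Char) (y : List Char) (ys : List (List Char)) :
    List.intercalate [s] ((x :: y) :: ys) = x :: List.intercalate [s] (y :: ys) := by
  simp [intercalate_single]

lemma inter_nil_head (s : Char) (y : List Char) (ys : List (List Char)) :
    List.intercalate [s] ([] :: y :: ys) = s :: List.intercalate [s] (y :: ys) := by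
  simp [intercalate_single]

lemma scanB_line (l : List Char) (tabs : Nat) (skip : Bool)
    (hnl : '\n' ∉ l) (hst : skip = true ↔ tabs = 9) :
    scanB l tabs skip = G l tabs skip := by
  induction l generalizing tabs skip with
  | nil =>
    have hG : G [] tabs skip = [] := by
      unfold G sp
      cases skip
      · simp only [Bool.false_eq_true, if_false]
        split
        · next h1 =>
          rw [if_neg (by simp; omega)]
          simp [List.intercalate]
        · simp [List.intercalate]
      · simp [List.intercalate]
    rw [hG, scanB]
  | cons c rest ih =>
    have hnl' : '\n' ∉ rest := fun h => hnl (by simp [h])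
    have hcnl : c ≠ '\n' := fun h => hnl (by simp [h])
    obtain ⟨h0, t0, hht⟩ : ∃ h0 t0, sp '\t' rest = h0 :: t0 := by
      cases h : sp '\t' rest with
      | nil => exact absurd h (sp_ne_nil _ _)
      | cons x xs => exact ⟨x, xs, rfl⟩
    by_cases hct : c = '\t'
    · subst hct
      have hsp : sp '\t' ('\t' :: rest) = [] :: h0 :: t0 := by
        unfold sp; rw [if_pos rfl, hht]
      by_cases h9 : tabs + 1 = 9
      · -- tabs = 8 : emit the tab and the '_', then skip the rest of field 9
        have htabs : tabs = 8 := by omega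
        subst htabs
        have hsk : skip = false := by
          cases skip
          · rfl
          · exact absurd (hst.mp rfl) (by omega)
        subst hsk
        rw [scanB]
        rw [if_neg (by decide), if_pos rfl, if_pos h9]
        rw [ih 9 true hnl' (by simp)]
        have hL : G rest 9 true = List.intercalate ['\t'] ([] :: t0) := by
          unfold G; rw [hht]; simp
        have hR : G ('\t' :: rest) 8 false =
            List.intercalate ['\t'] ([] :: ['_'] :: t0) := by
          unfold G; rw [hsp]
          rw [if_neg (by simp), if_pos (by omega : (8:Nat) < 9),
            if_pos (by simp : 9 - 8 < ([] :: h0 :: t0).length)]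
          norm_num
        rw [hL, hR, inter_nil_head]
        cases t0 with
        | nil => simp [List.intercalate]
        | cons u us => rw [inter_cons_head, inter_nil_head]
      · cases skip with
        | true =>
          have htabs : tabs = 9 := hst.mp rfl
          subst htabs
          rw [scanB]
          rw [if_neg (by decide), if_pos rfl, if_neg h9]
          rw [ih 10 false hnl' (by simp)]
          have hL : G rest 10 false = List.intercalate ['\t'] (h0 :: t0) := by
            unfold G; rw [hht]; simp
          have hR : G ('\t' :: rest) 9 true = List.intercalate ['\t'] ([] :: h0 :: t0) := by
            unfold G; rw [hsp]; simp
          rw [hL, hR, inter_nil_head]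
        | false =>
          rw [scanB]
          rw [if_neg (by decide), if_pos rfl, if_neg h9]
          rw [ih (tabs + 1) false hnl'
            (by simp only [Bool.false_eq_true, false_iff]; exact h9)]
          unfold G
          rw [hsp, hht]
          simp only [List.tail_cons, Bool.false_eq_true, if_false]
          by_cases hlt : tabs < 9
          · rw [if_pos hlt, if_pos (by omega : tabs + 1 < 9)]
            by_cases hc : 9 - (tabs + 1) < (h0 :: t0).length
            · rw [if_pos hc, if_pos (by simp at hc ⊢; omega)]
              rw [show 9 - tabs = (9 - (tabs + 1)) + 1 by omega]
              simp only [List.set_cons_succ]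
              obtain ⟨x, xs, hx⟩ : ∃ x xs, (h0 :: t0).set (9 - (tabs + 1)) ['_'] = x :: xs := by
                cases hk : 9 - (tabs + 1) with
                | zero => exact ⟨['_'], t0, rfl⟩
                | succ k => exact ⟨h0, t0.set k ['_'], rfl⟩
              rw [hx, inter_nil_head]
            · rw [if_neg hc, if_neg (by simp at hc ⊢; omega)]
              rw [inter_nil_head]
          · rw [if_neg hlt, if_neg (by omega : ¬ tabs + 1 < 9), inter_nil_head]
    · -- ordinary character
      have hsp : sp '\t' (c :: rest) = (c :: h0) :: t0 := by
        unfold sp; rw [if_neg hct, hht]; rfl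
      rw [scanB]
      rw [if_neg hcnl, if_neg hct]
      cases skip with
      | true =>
        have htabs : tabs = 9 := hst.mp rfl
        subst htabs
        rw [if_pos rfl]
        rw [ih 9 true hnl' (by simp)]
        have hL : G rest 9 true = List.intercalate ['\t'] ([] :: t0) := by
          unfold G; rw [hht]; simp
        have hR : G (c :: rest) 9 true = List.intercalate ['\t'] ([] :: t0) := by
          unfold G; rw [hsp]; simp
        rw [hL, hR]
      | false =>
        simp only [Bool.false_eq_true, if_false]
        rw [ih tabs false hnl' hst]
        unfold G
        rw [hsp, hht]
        simp only [Bool.false_eq_true, if_false]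
        by_cases hlt : tabs < 9
        · rw [if_pos hlt, if_pos hlt]
          by_cases hc : 9 - tabs < (h0 :: t0).length
          · rw [if_pos hc, if_pos (by simpa using hc)]
            obtain ⟨k, hk⟩ : ∃ k, 9 - tabs = k + 1 := ⟨9 - tabs - 1, by omega⟩
            rw [hk]
            simp only [List.set_cons_succ]
            rw [inter_cons_head]
          · rw [if_neg hc, if_neg (by simpa using hc), inter_cons_head]
        · rw [if_neg hlt, if_neg hlt, inter_cons_head]

-- splitting the scan at the newlines
lemma scanB_split (cs : List Char) (tabs : Nat) (skip : Bool) :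
    scanB cs tabs skip =
      scanB ((sp '\n' cs).headI) tabs skip ++
        ((sp '\n' cs).tail).flatMap (fun l => '\n' :: scanB l 0 false) := by
  induction cs generalizing tabs skip with
  | nil => simp [sp, scanB]
  | cons c rest ih =>
    by_cases hcn : c = '\n'
    · subst hcn
      rw [scanB]
      simp only [sp]
      rw [ih 0 false, ← sp_headI_tail '\n' rest]
      simp [scanB]
    · simp only [sp, if_neg hcn]
      obtain ⟨h0, t0, hht⟩ : ∃ h0 t0, sp '\n' rest = h0 :: t0 := by
        cases h : sp '\n' rest with
        | nil => exact absurd h (sp_ne_nil _ _)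
        | cons x xs => exact ⟨x, xs, rfl⟩
      rw [hht] at ih ⊢
      simp only [List.headI_cons, List.tail_cons] at ih ⊢
      by_cases hct : c = '\t'
      · subst hct
        by_cases h9 : tabs + 1 = 9 <;>
          simp [scanB, h9, ih]
      · cases skip <;> simp [scanB, if_neg hcn, if_neg hct, ih]

-- A's per-line transform is G at the initial state
lemma g_eq_G (l : List Char) :
    (let columns := sp '\t' l
     let columns := if 9 < columns.length then PySem.List.pySetD columns (9 : Int) ['_'] else columns
     List.intercalate ['\t'] columns) = G l 0 false := by
  dsimp only
  unfold G
  simp only [Bool.false_eq_true, if_false, Nat.sub_zero, if_pos (by norm_num : (0:Nat) < 9)]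
  split_ifs with h
  · rw [PySem.List.pySetD_of_nonneg (sp '\t' l) ['_'] (by norm_num : (0:Int) ≤ 9),
      show (9:Int).toNat = 9 from rfl]
  · rfl

-- ===== VERDICT (by name: the statement is the Claim_ definition above) =====
theorem remove_MISC_spec : Claim_equal_remove_MISC := by
  intro conll _
  show remove_MISC conll = remove_MISC_alt conll
  unfold remove_MISC remove_MISC_alt
  simp only [splitOn_eq_sp, PySem.Chars.join]
  rw [PySem.List.foldl_append_singleton_eq_map
    (fun line => List.intercalate ['\t']
      (if 9 < (sp '\t' line).length then PySem.List.pySetD (sp '\t' line) (9 : Int) ['_']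
       else sp '\t' line))]
  obtain ⟨h0, t0, hht⟩ : ∃ h0 t0, sp '\n' conll.toList = h0 :: t0 := by
    cases h : sp '\n' conll.toList with
    | nil => exact absurd h (sp_ne_nil _ _)
    | cons x xs => exact ⟨x, xs, rfl⟩
  have hmem : ∀ l ∈ h0 :: t0, '\n' ∉ l := hht ▸ sp_no_sep '\n' conll.toList
  have hline : ∀ l, '\n' ∉ l →
      List.intercalate ['\t']
        (if 9 < (sp '\t' l).length then PySem.List.pySetD (sp '\t' l) (9 : Int) ['_']
         else sp '\t' l) = scanB l 0 false := by
    intro l hl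
    rw [scanB_line l 0 false hl (by simp)]
    exact g_eq_G l
  rw [scanB_split, hht]
  simp only [List.headI_cons, List.tail_cons, List.nil_append, List.map_cons]
  rw [intercalate_single, List.flatMap_map, hline h0 (hmem h0 (by simp)),
    List.flatMap_congr (fun l hl => by rw [hline l (hmem l (by simp [hl]))])]
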